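-- pv_equiv track=rewrite | github.com/Siarshai/puzzles_for_ttrpg | words_condition/sandwichable_words.py | _split_inplace
-- ===== SOURCE A (Python) =====
-- from typing import List, Dict
--
-- def _split_inplace(words: List[str], letters: str):
--     result = {"": words}
--     for new_letter in letters:
--         split_update = {}
--         for existing_letters, words in result.items():
--             dont_have_new_letter, have_new_letter = [], []
--             for word in words:
--                 (dont_have_new_letter, have_new_letter)[new_letter in word].append(word)
--             result[existing_letters] = dont_have_new_letter
--             split_update[existing_letters + new_letter] = have_new_letter
--         result.update(split_update)
--     return result
-- ===== SOURCE B (Python) =====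
-- def _split_inplace(words, letters):
--     # Enumerate all bucket keys (subsequences reachable from the letter rounds),
--     # then place each word directly into its signature bucket in one pass.
--     keys = [""]
--     seen = {""}
--     for c in letters:
--         for k in list(keys):
--             nk = k + c
--             if nk not in seen:
--                 seen.add(nk)
--                 keys.append(nk)
--     buckets = {k: [] for k in keys}
--     for w in words:
--         chars = set(w)
--         sig = "".join(c for c in letters if c in chars)
--         buckets[sig].append(w)
--     return buckets
-- ===== Notes on version B (the rewrite author's own statement) =====
-- stated objective: alternative
-- what changed: Instead of A's per-letter pass that re-splits every existing bucket, B computes each word's letter-signature once (via a per-word character set) and places it directly into its bucket, generating the bucket keys separately by the same subsequence evolution.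
import Mathlib
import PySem

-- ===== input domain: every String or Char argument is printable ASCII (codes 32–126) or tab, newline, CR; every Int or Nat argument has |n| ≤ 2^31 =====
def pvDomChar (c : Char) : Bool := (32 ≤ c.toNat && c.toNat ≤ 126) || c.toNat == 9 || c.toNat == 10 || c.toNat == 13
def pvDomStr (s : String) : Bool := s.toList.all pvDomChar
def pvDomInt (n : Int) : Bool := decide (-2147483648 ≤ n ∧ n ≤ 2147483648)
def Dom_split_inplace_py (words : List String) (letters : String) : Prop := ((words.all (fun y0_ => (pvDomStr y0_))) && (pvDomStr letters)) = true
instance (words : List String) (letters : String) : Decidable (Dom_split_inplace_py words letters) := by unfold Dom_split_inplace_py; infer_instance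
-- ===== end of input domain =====

-- B re-implements the bucketing in one pass per word (direct signature bucketing)
-- instead of A's per-letter re-splitting of every bucket; equal return value proved below.
-- Dict keys are represented as List Char while the dicts are built (Python builds them by
-- one-character concatenation) and wrapped into String at the very end, in both ports.

-- ===== PORT A =====
-- (dont_have_new_letter, have_new_letter)[new_letter in word].append(word)
def pvSplitWordA (c : Char) (dh : List String × List String) (word : String) : List String × List String :=
  if PySem.Str.isIn (String.singleton c) word then (dh.1, dh.2 ++ [word]) else (dh.1 ++ [word], dh.2)

-- one iteration of `for new_letter in letters` (iterating the round-start items snapshot;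
-- inside the Python loop only the current key's value is reassigned, so this is exact)
def pvRoundA (result : PySem.Dict (List Char) (List String)) (new_letter : Char) :
    PySem.Dict (List Char) (List String) :=
  let rs := result.items.foldl
    (fun (acc : PySem.Dict (List Char) (List String) × PySem.Dict (List Char) (List String)) kv =>
      let dh := kv.2.foldl (pvSplitWordA new_letter) ([], [])
      (acc.1.insert kv.1 dh.1, acc.2.insert (kv.1 ++ [new_letter]) dh.2))
    (result, PySem.Dict.empty)
  rs.1.update rs.2.items

def split_inplace_py (words : List String) (letters : String) : List (String × List String) :=
  let result : PySem.Dict (List Char) (List String) := PySem.Dict.empty.insert [] words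
  let result := letters.toList.foldl pvRoundA result
  result.items.map (fun kv => (String.ofList kv.1, kv.2))

-- ===== PORT B =====
-- sig = "".join(c for c in letters if c in chars)
def pvSigB (letters : List Char) (w : String) : List Char :=
  let chars := PySem.Set.ofList w.toList
  letters.filter (fun c => PySem.Set.contains chars c)

def split_inplace_py_alt (words : List String) (letters : String) : List (String × List String) :=
  -- keys = [""] ; seen = {""}
  let ks : List (List Char) × PySem.Set (List Char) := ([[]], PySem.Set.ofList [[]])
  let ks := letters.toList.foldl
    (fun ks c =>
      ks.1.foldl (fun ks' k =>
        let nk := k ++ [c]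
        if PySem.Set.contains ks'.2 nk then ks' else (ks'.1 ++ [nk], PySem.Set.add ks'.2 nk)) ks)
    ks
  -- buckets = {k: [] for k in keys}
  let buckets := ks.1.foldl (fun (d : PySem.Dict (List Char) (List String)) k => d.insert k []) PySem.Dict.empty
  -- buckets[sig].append(w)  (sig is always an existing key, so no KeyError; modify is exact here)
  let buckets := words.foldl (fun d w => d.modify (pvSigB letters.toList w) [] (· ++ [w])) buckets
  buckets.items.map (fun kv => (String.ofList kv.1, kv.2))

-- ===== PRECONDITION & SPEC =====
def Spec_split_inplace_py (words : List String) (letters : String) (out : List (String × List String)) : Prop := out = split_inplace_py_alt words letters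
instance (words : List String) (letters : String) (out : List (String × List String)) : Decidable (Spec_split_inplace_py words letters out) := by unfold Spec_split_inplace_py; infer_instance

-- ===== CLAIM (what is proved, stated in full; the proofs are below) =====
def Claim_equal_split_inplace_py : Prop := ∀ (words : List String) (letters : String), Dom_split_inplace_py words letters → Spec_split_inplace_py words letters (split_inplace_py words letters)

-- ===== LEMMAS AND PROOFS =====

-- `c` occurs in word `w`
def pvHas (w : String) (c : Char) : Bool := w.toList.contains c

-- the signature of `w` under processed letters `cs`
def pvSig (cs : List Char) (w : String) : List Char := cs.filter (pvHas w)

-- key evolution of one round, and of a whole letters list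
def pvKeyStep (K : List (List Char)) (c : Char) : List (List Char) :=
  K.foldl (fun K' k => PySem.Set.add K' (k ++ [c])) K

def pvKeys (cs : List Char) : List (List Char) := cs.foldl pvKeyStep [[]]

-- the canonical content of the dict after processing `cs`
def pvCanon (ws : List String) (cs : List Char) : List (List Char × List String) :=
  (pvKeys cs).map (fun k => (k, ws.filter (fun w => pvSig cs w == k)))

lemma pvHas_isIn (c : Char) (w : String) :
    PySem.Str.isIn (String.singleton c) w = pvHas w c := by
  have h1 := PySem.Str.isIn_iff_infix (String.singleton c) w
  rw [String.toList_singleton, List.singleton_infix_iff] at h1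
  unfold pvHas
  rw [List.contains_eq_mem]
  exact Bool.eq_iff_iff.mpr (by rw [h1]; simp)

lemma pvHas_setContains (c : Char) (w : String) :
    PySem.Set.contains (PySem.Set.ofList w.toList) c = pvHas w c := by
  have h1 := PySem.Set.contains_iff (PySem.Set.ofList w.toList) c
  rw [PySem.Set.mem_ofList] at h1
  unfold pvHas
  rw [List.contains_eq_mem]
  exact Bool.eq_iff_iff.mpr (by rw [h1]; simp)

lemma pvSigB_eq (cs : List Char) (w : String) : pvSigB cs w = pvSig cs w := by
  simp only [pvSigB, pvSig]
  exact List.filter_congr (fun c _ => by rw [pvHas_setContains])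

lemma mem_pvKeyStep {y : List Char} (K : List (List Char)) (c : Char) :
    y ∈ pvKeyStep K c ↔ y ∈ K ∨ ∃ k ∈ K, y = k ++ [c] := by
  simpa [pvKeyStep] using PySem.Set.mem_foldl_add K (fun k => k ++ [c]) K y

lemma nodup_foldl_add {β : Type} (f : β → List Char) :
    ∀ (l : List β) (s : PySem.Set (List Char)), s.Nodup →
      (l.foldl (fun s b => PySem.Set.add s (f b)) s).Nodup := by
  intro l
  induction l with
  | nil => intro s hs; simpa
  | cons b t ih => intro s hs; exact ih _ (PySem.Set.nodup_add s (f b) hs)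

lemma nodup_pvKeys (cs : List Char) : (pvKeys cs).Nodup := by
  suffices h : ∀ (cs : List Char) (K : List (List Char)), K.Nodup → (cs.foldl pvKeyStep K).Nodup by
    exact h cs [[]] (by simp)
  intro cs
  induction cs with
  | nil => intro K h; simpa
  | cons c t ih => intro K h; exact ih _ (nodup_foldl_add _ K K h)

lemma pvKeys_append_singleton (cs : List Char) (c : Char) :
    pvKeys (cs ++ [c]) = pvKeyStep (pvKeys cs) c := by
  simp [pvKeys, List.foldl_append]

lemma pvSig_append_singleton (cs : List Char) (c : Char) (w : String) :
    pvSig (cs ++ [c]) w = pvSig cs w ++ (if pvHas w c then [c] else []) := by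
  by_cases h : pvHas w c <;> simp [pvSig, List.filter_append, h]

lemma pvSig_mem_pvKeys (cs : List Char) (w : String) : pvSig cs w ∈ pvKeys cs := by
  induction cs using List.reverseRecOn with
  | nil => simp [pvSig, pvKeys]
  | append_singleton t c ih =>
      rw [pvKeys_append_singleton, pvSig_append_singleton, mem_pvKeyStep]
      by_cases h : pvHas w c
      · exact Or.inr ⟨pvSig t w, ih, by simp [h]⟩
      · simp [h, ih]

lemma pvHas_of_mem_pvSig {cs : List Char} {w : String} {c : Char} (h : c ∈ pvSig cs w) :
    pvHas w c = true := (List.mem_filter.mp h).2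

-- sig(p ++ [c]) w = k0 ++ [c]  ↔  sig p w = k0 ∧ has w c
lemma pvSig_snoc_eq_append (p : List Char) (c : Char) (w : String) (k0 : List Char) :
    (pvSig (p ++ [c]) w == k0 ++ [c]) = ((pvSig p w == k0) && pvHas w c) := by
  rw [pvSig_append_singleton]
  by_cases h : pvHas w c
  · simp [h]
  · have hne : pvSig p w ≠ k0 ++ [c] := by
      intro he
      have hc : c ∈ pvSig p w := he ▸ List.mem_append_right _ (List.mem_singleton_self c)
      simp [pvHas_of_mem_pvSig hc] at h
    simp [h, hne]

-- keys of a canonical dict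
lemma keys_mk_map {α : Type} (K : List (List Char)) (g : List Char → α) :
    (PySem.Dict.mk (K.map (fun k => (k, g k)))).keys = K := by
  simp [PySem.Dict.keys, List.map_map, Function.comp_def]

lemma pvDictExt {d e : PySem.Dict (List Char) (List String)} (h : d.items = e.items) : d = e := by
  cases d; cases e; simpa [PySem.Dict.items] using h

-- the word-splitting loop of A
lemma pvSplitWordA_fold (c : Char) (l : List String) (a b : List String) :
    l.foldl (pvSplitWordA c) (a, b) =
      (a ++ l.filter (fun w => !pvHas w c), b ++ l.filter (fun w => pvHas w c)) := by
  induction l generalizing a b with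
  | nil => simp
  | cons w t ih =>
      simp only [List.foldl_cons, pvSplitWordA, pvHas_isIn]
      by_cases h : pvHas w c <;> simp [h, ih]

-- inserting fresh, pairwise distinct keys appends them in order
lemma foldl_insert_fresh {β : Type} (f : β → List Char) (g : β → List String) :
    ∀ (l : List β) (d : PySem.Dict (List Char) (List String)),
      (l.map f).Nodup → (∀ b ∈ l, f b ∉ d.keys) →
      (l.foldl (fun r b => r.insert (f b) (g b)) d).items = d.items ++ l.map (fun b => (f b, g b)) := by
  intro l
  induction l with
  | nil => intro d _ _; simp
  | cons b t ih =>
      intro d hnd hf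
      rw [List.map_cons, List.nodup_cons] at hnd
      have hc : d.contains (f b) = false := by
        by_contra h
        exact hf b (by simp) ((PySem.Dict.contains_iff_mem_keys d (f b)).mp (by simpa using h))
      simp only [List.foldl_cons]
      rw [ih (d.insert (f b) (g b)) hnd.2 ?_]
      · rw [PySem.Dict.items_insert_of_not_contains d (g b) hc]; simp
      · intro b' hb'
        rw [PySem.Dict.keys_insert_of_not_contains d _ hc]
        simp only [List.mem_append, List.mem_singleton]
        rintro (h | h)
        · exact hf b' (by simp [hb']) h
        · exact hnd.1 (h ▸ List.mem_map_of_mem hb')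

-- overwriting existing keys in place
lemma foldl_insert_overwrite (g' : List Char → List String) :
    ∀ (R : List (List Char)) (d : PySem.Dict (List Char) (List String)),
      R.Nodup → (∀ k ∈ R, k ∈ d.keys) →
      (R.foldl (fun r k => r.insert k (g' k)) d).items
        = d.items.map (fun kv => if kv.1 ∈ R then (kv.1, g' kv.1) else kv) := by
  intro R
  induction R with
  | nil => intro d _ _; simp
  | cons k0 R' ih =>
      intro d hnd hmem
      rw [List.nodup_cons] at hnd
      have hc : d.contains k0 = true :=
        (PySem.Dict.contains_iff_mem_keys d k0).mpr (hmem k0 (by simp))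
      simp only [List.foldl_cons]
      rw [ih (d.insert k0 (g' k0)) hnd.2 ?_]
      · rw [PySem.Dict.items_insert_of_contains d (g' k0) hc, List.map_map]
        refine List.map_congr_left (fun kv _ => ?_)
        simp only [Function.comp_apply]
        by_cases he : kv.1 = k0
        · have : kv.1 ∉ R' := he ▸ hnd.1
          simp [he]
        · simp only [beq_iff_eq, if_neg he]
          by_cases hr : kv.1 ∈ R' <;> simp [hr, he]
      · intro k hk
        rw [PySem.Dict.keys_insert_of_contains d _ hc]
        exact hmem k (by simp [hk])

-- hav k0 is exactly the (p ++ [c])-bucket of k0 ++ [c]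
lemma pvHav_eq_canon (ws : List String) (p : List Char) (c : Char) (k0 : List Char) :
    ws.filter (fun w => pvSig (p ++ [c]) w == k0 ++ [c])
      = ws.filter (fun w => pvSig p w == k0 && pvHas w c) :=
  List.filter_congr (fun w _ => pvSig_snoc_eq_append p c w k0)

-- the update loop: inserting (k ++ [c], hav k) for k ∈ P into the dict holding the dont-values
lemma pvUpdLoop (ws : List String) (p : List Char) (c : Char) :
    ∀ (R Q : List (List Char)),
      ((R.map (fun k => (k ++ [c],
          ws.filter (fun w => pvSig p w == k && pvHas w c)))).foldl
        (fun r kv => r.insert kv.1 kv.2)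
        (PySem.Dict.mk ((Q.foldl (fun K' k => PySem.Set.add K' (k ++ [c])) (pvKeys p)).map
          (fun k => (k, if k ∈ Q.map (· ++ [c])
                        then ws.filter (fun w => pvSig (p ++ [c]) w == k)
                        else ws.filter (fun w => pvSig p w == k && !pvHas w c)))))).items
      = ((Q ++ R).foldl (fun K' k => PySem.Set.add K' (k ++ [c])) (pvKeys p)).map
          (fun k => (k, if k ∈ (Q ++ R).map (· ++ [c])
                        then ws.filter (fun w => pvSig (p ++ [c]) w == k)
                        else ws.filter (fun w => pvSig p w == k && !pvHas w c))) := by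
  intro R
  induction R with
  | nil => intro Q; simp
  | cons k0 R' ih =>
      intro Q
      have hKS : (Q.foldl (fun K' k => PySem.Set.add K' (k ++ [c])) (pvKeys p)).Nodup :=
        nodup_foldl_add _ Q (pvKeys p) (nodup_pvKeys p)
      have hQ' : ∀ k, k ∈ (Q ++ [k0]).map (· ++ [c]) ↔ (k ∈ Q.map (· ++ [c]) ∨ k = k0 ++ [c]) := by
        intro k; simp
      have hnkQ' : (k0 ++ [c]) ∈ (Q ++ [k0]).map (· ++ [c]) := (hQ' _).mpr (Or.inr rfl)
      have hstep :
          ((PySem.Dict.mk ((Q.foldl (fun K' k => PySem.Set.add K' (k ++ [c])) (pvKeys p)).map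
              (fun k => (k, if k ∈ Q.map (· ++ [c])
                            then ws.filter (fun w => pvSig (p ++ [c]) w == k)
                            else ws.filter (fun w => pvSig p w == k && !pvHas w c))))).insert
            (k0 ++ [c]) (ws.filter (fun w => pvSig p w == k0 && pvHas w c)))
          = PySem.Dict.mk (((Q ++ [k0]).foldl (fun K' k => PySem.Set.add K' (k ++ [c])) (pvKeys p)).map
              (fun k => (k, if k ∈ (Q ++ [k0]).map (· ++ [c])
                            then ws.filter (fun w => pvSig (p ++ [c]) w == k)
                            else ws.filter (fun w => pvSig p w == k && !pvHas w c)))) := by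
        refine pvDictExt ?_
        rw [List.foldl_append, List.foldl_cons, List.foldl_nil]
        by_cases hmem : (k0 ++ [c]) ∈ Q.foldl (fun K' k => PySem.Set.add K' (k ++ [c])) (pvKeys p)
        · rw [PySem.Dict.items_insert_of_contains _ _
            (by rw [PySem.Dict.contains_eq_decide_mem_keys, keys_mk_map]; exact decide_eq_true hmem)]
          rw [PySem.Set.add_of_mem hmem]
          simp only [List.map_map]
          refine List.map_congr_left (fun k hk => ?_)
          simp only [Function.comp_apply, beq_iff_eq]
          by_cases he : k = k0 ++ [c]
          · subst he; simp [pvHav_eq_canon]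
          · simp [he]
        · rw [PySem.Dict.items_insert_of_not_contains _ _
            (by rw [PySem.Dict.contains_eq_decide_mem_keys, keys_mk_map]; exact decide_eq_false hmem)]
          rw [PySem.Set.add_of_not_mem hmem]
          simp only [List.map_append]
          congr 1
          · refine List.map_congr_left (fun k hk => ?_)
            have he : k ≠ k0 ++ [c] := fun h => hmem (h ▸ hk)
            simp [he]
          · simp [pvHav_eq_canon]
      simp only [List.map_cons, List.foldl_cons]
      rw [hstep, ih (Q ++ [k0])]
      simp

-- the dont/hav values A computes for a bucket are filters of ws
lemma pvDont_eq (ws : List String) (p : List Char) (c : Char) (k : List Char) :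
    ((ws.filter (fun w => pvSig p w == k)).foldl (pvSplitWordA c) ([], [])).1
      = ws.filter (fun w => pvSig p w == k && !pvHas w c) := by
  rw [pvSplitWordA_fold, List.filter_filter]
  simp [Bool.and_comm]

lemma pvHav_eq (ws : List String) (p : List Char) (c : Char) (k : List Char) :
    ((ws.filter (fun w => pvSig p w == k)).foldl (pvSplitWordA c) ([], [])).2
      = ws.filter (fun w => pvSig p w == k && pvHas w c) := by
  rw [pvSplitWordA_fold, List.filter_filter]
  simp [Bool.and_comm]

-- one round of A preserves the canonical form
lemma pvRoundA_canon (ws : List String) (p : List Char) (c : Char)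
    (d : PySem.Dict (List Char) (List String)) (hd : d.items = pvCanon ws p) :
    (pvRoundA d c).items = pvCanon ws (p ++ [c]) := by
  have hD : d = PySem.Dict.mk (pvCanon ws p) := pvDictExt hd
  subst hD
  simp only [pvRoundA, pvCanon]
  rw [PySem.List.foldl_prod_mk
      (fun (r : PySem.Dict (List Char) (List String)) (kv : List Char × List String) =>
        r.insert kv.1 (kv.2.foldl (pvSplitWordA c) ([], [])).1)
      (fun (s : PySem.Dict (List Char) (List String)) (kv : List Char × List String) =>
        s.insert (kv.1 ++ [c]) (kv.2.foldl (pvSplitWordA c) ([], [])).2)]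
  rw [List.foldl_map, List.foldl_map]
  -- the res part: every key of the canonical dict is overwritten with its dont-value
  have hres :
      ((pvKeys p).foldl (fun r k =>
          r.insert k (((ws.filter (fun w => pvSig p w == k)).foldl (pvSplitWordA c) ([], [])).1))
        (PySem.Dict.mk ((pvKeys p).map (fun k => (k, ws.filter (fun w => pvSig p w == k)))))).items
      = (pvKeys p).map (fun k => (k, ws.filter (fun w => pvSig p w == k && !pvHas w c))) := by
    rw [foldl_insert_overwrite
        (fun k => (((ws.filter (fun w => pvSig p w == k)).foldl (pvSplitWordA c) ([], [])).1))
        (pvKeys p) _ (nodup_pvKeys p)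
        (by intro k hk; rw [keys_mk_map]; exact hk)]
    simp only [List.map_map]
    refine List.map_congr_left (fun k hk => ?_)
    simp [hk, pvDont_eq]
  -- the split_update part: fresh keys k ++ [c] are appended with their hav-values
  have hsu :
      ((pvKeys p).foldl (fun s k =>
          s.insert (k ++ [c]) (((ws.filter (fun w => pvSig p w == k)).foldl (pvSplitWordA c) ([], [])).2))
        PySem.Dict.empty).items
      = (pvKeys p).map (fun k => (k ++ [c], ws.filter (fun w => pvSig p w == k && pvHas w c))) := by
    rw [foldl_insert_fresh (fun k => k ++ [c])
        (fun k => (((ws.filter (fun w => pvSig p w == k)).foldl (pvSplitWordA c) ([], [])).2))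
        (pvKeys p) PySem.Dict.empty
        ((nodup_pvKeys p).map (List.append_left_injective [c]))
        (by intro k _ h; simp [PySem.Dict.keys, PySem.Dict.empty] at h)]
    simp only [PySem.Dict.empty, List.nil_append]
    exact List.map_congr_left (fun k _ => by rw [pvHav_eq])
  -- the final update loop
  rw [PySem.Dict.update]
  have hres' : ((pvKeys p).foldl (fun r k =>
          r.insert k (((ws.filter (fun w => pvSig p w == k)).foldl (pvSplitWordA c) ([], [])).1))
        (PySem.Dict.mk ((pvKeys p).map (fun k => (k, ws.filter (fun w => pvSig p w == k))))))
      = PySem.Dict.mk ((pvKeys p).map (fun k => (k, ws.filter (fun w => pvSig p w == k && !pvHas w c)))) :=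
    pvDictExt hres
  rw [hres', hsu]
  have h0 := pvUpdLoop ws p c (pvKeys p) []
  simp only [List.map_nil, List.not_mem_nil, if_false, List.foldl_nil, List.nil_append] at h0
  rw [h0]
  rw [pvKeys_append_singleton, pvKeyStep]
  refine List.map_congr_left (fun k hk => ?_)
  by_cases hr : k ∈ (pvKeys p).map (· ++ [c])
  · simp [hr]
  · simp only [if_neg hr]
    refine congrArg (fun v => (k, v)) (List.filter_congr (fun w _ => ?_))
    rw [pvSig_append_singleton]
    by_cases hw : pvHas w c
    · have hne : pvSig p w ++ [c] ≠ k := by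
        intro h
        exact hr (h ▸ List.mem_map_of_mem (pvSig_mem_pvKeys p w))
      simp [hw, hne]
    · simp [hw]

lemma portA_items (ws : List String) (cs : List Char) :
    (cs.foldl pvRoundA (PySem.Dict.empty.insert ([] : List Char) ws)).items = pvCanon ws cs := by
  suffices h : ∀ (cs p : List Char) (d : PySem.Dict (List Char) (List String)),
      d.items = pvCanon ws p → (cs.foldl pvRoundA d).items = pvCanon ws (p ++ cs) by
    refine (h cs [] _ ?_).trans (by simp)
    rw [PySem.Dict.items_insert_of_not_contains _ _ (by rfl)]
    simp [PySem.Dict.empty, pvCanon, pvKeys, pvSig, List.filter_true]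
  intro cs
  induction cs with
  | nil => intro p d hd; simpa using hd
  | cons c t ih =>
      intro p d hd
      rw [List.foldl_cons]
      have := ih (p ++ [c]) (pvRoundA d c) (pvRoundA_canon ws p c d hd)
      simpa using this

-- B: the key-generation pair fold computes (pvKeys, pvKeys)
lemma pvKeysB_inner (c : Char) :
    ∀ (L K : List (List Char)),
      (L.foldl (fun ks' k =>
        if PySem.Set.contains ks'.2 (k ++ [c]) then ks'
        else (ks'.1 ++ [k ++ [c]], PySem.Set.add ks'.2 (k ++ [c]))) (K, K))
      = (L.foldl (fun K' k => PySem.Set.add K' (k ++ [c])) K,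
         L.foldl (fun K' k => PySem.Set.add K' (k ++ [c])) K) := by
  intro L
  induction L with
  | nil => intro K; rfl
  | cons k t ih =>
      intro K
      simp only [List.foldl_cons]
      by_cases h : (k ++ [c]) ∈ K
      · rw [if_pos (by simpa using (PySem.Set.contains_iff K (k ++ [c])).mpr h),
            PySem.Set.add_of_mem h]
        exact ih K
      · rw [if_neg (by simp [h]),
            PySem.Set.add_of_not_mem h]
        exact ih (K ++ [k ++ [c]])

lemma pvKeysB (cs : List Char) :
    (cs.foldl (fun ks c =>
        ks.1.foldl (fun ks' k =>
          if PySem.Set.contains ks'.2 (k ++ [c]) then ks'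
          else (ks'.1 ++ [k ++ [c]], PySem.Set.add ks'.2 (k ++ [c]))) ks)
      (([[]] : List (List Char)), PySem.Set.ofList [[]]))
    = (pvKeys cs, pvKeys cs) := by
  suffices h : ∀ (cs : List Char) (K : List (List Char)),
      (cs.foldl (fun ks c =>
        ks.1.foldl (fun ks' k =>
          if PySem.Set.contains ks'.2 (k ++ [c]) then ks'
          else (ks'.1 ++ [k ++ [c]], PySem.Set.add ks'.2 (k ++ [c]))) ks) (K, K))
      = (cs.foldl pvKeyStep K, cs.foldl pvKeyStep K) by
    exact h cs [[]]
  intro cs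
  induction cs with
  | nil => intro K; rfl
  | cons c t ih =>
      intro K
      simp only [List.foldl_cons]
      rw [pvKeysB_inner c K K]
      exact ih _

-- B: the word loop appends each word to its signature bucket
lemma pvModLoop (cs : List Char) (K : List (List Char)) (hnd : K.Nodup) :
    ∀ (l : List String) (g : List Char → List String), (∀ w ∈ l, pvSig cs w ∈ K) →
      ((l.foldl (fun d w => d.modify (pvSigB cs w) [] (· ++ [w]))
          (PySem.Dict.mk (K.map (fun k => (k, g k))))).items)
      = K.map (fun k => (k, g k ++ l.filter (fun w => pvSig cs w == k))) := by
  intro l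
  induction l with
  | nil => intro g _; simp
  | cons w t ih =>
      intro g hl
      have hw : pvSig cs w ∈ K := hl w (by simp)
      have hgd : (PySem.Dict.mk (K.map (fun k => (k, g k)))).getD (pvSig cs w) [] = g (pvSig cs w) :=
        PySem.Dict.getD_of_mem_items _ (List.mem_map_of_mem (f := fun k => (k, g k)) hw)
          (by rw [keys_mk_map]; exact hnd) []
      have hstep :
          (PySem.Dict.mk (K.map (fun k => (k, g k)))).modify (pvSigB cs w) [] (· ++ [w])
          = PySem.Dict.mk (K.map (fun k =>
              (k, if k = pvSig cs w then g (pvSig cs w) ++ [w] else g k))) := by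
        refine pvDictExt ?_
        rw [PySem.Dict.modify, pvSigB_eq, hgd]
        rw [PySem.Dict.items_insert_of_contains _ _
          (by rw [PySem.Dict.contains_eq_decide_mem_keys, keys_mk_map]; exact decide_eq_true hw)]
        simp only [List.map_map]
        refine List.map_congr_left (fun k _ => ?_)
        simp only [Function.comp_apply, beq_iff_eq]
        by_cases he : k = pvSig cs w <;> simp [he]
      rw [List.foldl_cons, hstep,
        ih (fun k => if k = pvSig cs w then g (pvSig cs w) ++ [w] else g k) (fun w' hw' => hl w' (by simp [hw']))]
      refine List.map_congr_left (fun k hk => ?_)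
      rw [List.filter_cons]
      by_cases he : k = pvSig cs w
      · subst he; simp
      · have : (pvSig cs w == k) = false := by simp [Ne.symm he]
        simp [he, this]

lemma portB_items (ws : List String) (cs : List Char) :
    ((ws.foldl (fun d w => d.modify (pvSigB cs w) [] (· ++ [w]))
        ((pvKeys cs).foldl (fun (d : PySem.Dict (List Char) (List String)) k => d.insert k []) PySem.Dict.empty)).items)
    = pvCanon ws cs := by
  have hinit : ((pvKeys cs).foldl (fun (d : PySem.Dict (List Char) (List String)) k => d.insert k []) PySem.Dict.empty)
      = PySem.Dict.mk ((pvKeys cs).map (fun k => (k, ([] : List String)))) := by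
    refine pvDictExt ?_
    rw [foldl_insert_fresh (fun k => k) (fun _ => ([] : List String)) (pvKeys cs) PySem.Dict.empty
        (by simpa using nodup_pvKeys cs)
        (by intro k _ h; simp [PySem.Dict.keys, PySem.Dict.empty] at h)]
    simp [PySem.Dict.empty]
  rw [hinit, pvModLoop cs (pvKeys cs) (nodup_pvKeys cs) ws (fun _ => []) (fun w _ => pvSig_mem_pvKeys cs w)]
  simp [pvCanon]

-- ===== VERDICT (by name: the statement is the Claim_ definition above) =====
theorem split_inplace_py_spec : Claim_equal_split_inplace_py := by
  intro words letters _
  unfold Spec_split_inplace_py split_inplace_py split_inplace_py_alt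
  simp only [pvKeysB letters.toList, portA_items words letters.toList,
    portB_items words letters.toList]
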